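-- pv_equiv track=rewrite | github.com/utilitarianexe/brains | brains/environment/base.py | result_convert
-- ===== SOURCE A (Python) =====
-- def result_convert(found_output_ids: list, desired_output_id:int) -> tuple[bool, bool]:
--     correct_cell_fired = False
--     incorrect_cell_fired = False
--     if desired_output_id in found_output_ids:
--         correct_cell_fired = True
--
--     for output_id in found_output_ids:
--         if output_id != desired_output_id:
--             incorrect_cell_fired = True
--     return correct_cell_fired, incorrect_cell_fired
-- ===== SOURCE B (Python) =====
-- def result_convert(found_output_ids: list, desired_output_id: int) -> tuple[bool, bool]:
--     c = found_output_ids.count(desired_output_id)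
--     return c > 0, c < len(found_output_ids)
-- ===== Notes on version B (the rewrite author's own statement) =====
-- stated objective: simpler
-- what changed: Replaces the membership test plus explicit flag-setting loop with counting: c = list.count(desired); correct = c > 0, incorrect = c < len(list) (some element differs iff not all occurrences are the desired id).
import Mathlib
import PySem

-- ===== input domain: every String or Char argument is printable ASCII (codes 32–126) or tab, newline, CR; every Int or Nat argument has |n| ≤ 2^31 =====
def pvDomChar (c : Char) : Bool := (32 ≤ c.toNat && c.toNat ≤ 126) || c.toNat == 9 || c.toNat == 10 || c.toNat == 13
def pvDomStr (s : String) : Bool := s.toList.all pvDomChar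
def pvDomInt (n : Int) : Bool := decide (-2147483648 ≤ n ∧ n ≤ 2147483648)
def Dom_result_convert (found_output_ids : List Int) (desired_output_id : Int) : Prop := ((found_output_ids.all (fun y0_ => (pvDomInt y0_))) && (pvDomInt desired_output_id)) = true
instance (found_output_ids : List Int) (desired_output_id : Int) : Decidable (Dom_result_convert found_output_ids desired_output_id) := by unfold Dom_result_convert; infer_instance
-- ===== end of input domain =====

-- B answers both questions by one count of the desired id: correct = count > 0, incorrect = count < length; no membership test or flag-setting loop: simpler.

-- ===== PORT A =====
def result_convert (found_output_ids : List Int) (desired_output_id : Int) : Bool × Bool :=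
  let correct_cell_fired := false
  let incorrect_cell_fired := false
  let correct_cell_fired := if found_output_ids.contains desired_output_id then true else correct_cell_fired
  let incorrect_cell_fired := found_output_ids.foldl
    (fun acc output_id => if output_id ≠ desired_output_id then true else acc) incorrect_cell_fired
  (correct_cell_fired, incorrect_cell_fired)

-- ===== PORT B =====
def result_convert_alt (found_output_ids : List Int) (desired_output_id : Int) : Bool × Bool :=
  let c := PySem.List.count found_output_ids desired_output_id
  (decide (0 < c), decide (c < found_output_ids.length))

-- ===== PRECONDITION & SPEC =====
def Spec_result_convert (found_output_ids : List Int) (desired_output_id : Int) (out : Bool × Bool) : Prop := out = result_convert_alt found_output_ids desired_output_id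
instance (found_output_ids : List Int) (desired_output_id : Int) (out : Bool × Bool) : Decidable (Spec_result_convert found_output_ids desired_output_id out) := by unfold Spec_result_convert; infer_instance

-- ===== CLAIM (what is proved, stated in full; the proofs are below) =====
def Claim_equal_result_convert : Prop := ∀ (found_output_ids : List Int) (desired_output_id : Int), Dom_result_convert found_output_ids desired_output_id → Spec_result_convert found_output_ids desired_output_id (result_convert found_output_ids desired_output_id)

-- ===== LEMMAS AND PROOFS =====
theorem foldl_neq_any (xs : List Int) (d : Int) (acc : Bool) :
    xs.foldl (fun acc x => if x ≠ d then true else acc) acc = (acc || xs.any (fun x => x ≠ d)) := by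
  induction xs generalizing acc with
  | nil => simp
  | cons x xs ih =>
    simp only [List.foldl_cons, List.any_cons, ih]
    by_cases h : x = d <;> simp [h]

theorem count_lt_length_iff_any (xs : List Int) (d : Int) :
    (xs.count d < xs.length) ↔ xs.any (fun x => x ≠ d) = true := by
  constructor
  · intro h
    by_contra hno
    simp only [List.any_eq_true, decide_eq_true_eq, not_exists, not_and, not_not] at hno
    have : xs.count d = xs.length := by
      rw [List.count_eq_length]; intro a ha; exact (hno a ha).symm
    omega
  · rintro h
    simp only [List.any_eq_true, decide_eq_true_eq] at h
    obtain ⟨x, hx, hne⟩ := h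
    have hle : xs.count d ≤ xs.length := List.count_le_length
    rcases lt_or_eq_of_le hle with h' | h'
    · exact h'
    · exfalso
      rw [List.count_eq_length] at h'
      exact hne ((h' x hx).symm)

-- ===== VERDICT (by name: the statement is the Claim_ definition above) =====
theorem result_convert_spec : Claim_equal_result_convert := by
  intro xs d _
  unfold Spec_result_convert result_convert result_convert_alt
  simp only [foldl_neq_any, Bool.false_or, PySem.List.count_eq]
  congr 1
  · simp [List.count_pos_iff]
  · rw [Bool.eq_iff_iff, decide_eq_true_iff]
    exact (count_lt_length_iff_any xs d).symm
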